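-- pv_equiv track=rewrite | github.com/curtisdearing/u4u-engine | engine/annotators/receptor_mapper.py | generate_receptor_summary
-- ===== SOURCE A (Python) =====
-- def generate_receptor_summary(receptor_profiles: list[dict]) -> str:
--     """
--     Generate a narrative summary across all receptor profiles.
--
--     Parameters
--     ----------
--     receptor_profiles : list[dict]
--         Output from map_receptors().
--
--     Returns
--     -------
--     str
--         2-4 sentence clinical narrative.
--     """
--     if not receptor_profiles:
--         return "No peptide-relevant receptor variants detected in this patient."
--
--     high = [p for p in receptor_profiles if p["expression_level"] == "HIGH"]
--     low = [p for p in receptor_profiles if p["expression_level"] == "LOW"]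
--
--     parts = []
--     if high:
--         names = ", ".join(p["receptor_name"] for p in high)
--         parts.append(
--             f"Patient shows elevated expression for {names}, "
--             f"suggesting enhanced sensitivity to related peptide therapies."
--         )
--     if low:
--         names = ", ".join(p["receptor_name"] for p in low)
--         parts.append(
--             f"Reduced expression predicted for {names}; "
--             f"dose adjustment or alternative targets may be warranted."
--         )
--     if not high and not low:
--         parts.append(
--             "All detected receptor expression levels are within normal range. "
--             "Standard peptide dosing protocols are appropriate."
--         )
--
--     total = len(receptor_profiles)
--     parts.append(
--         f"Analysis covered {total} receptor{'s' if total != 1 else ''} "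
--         f"across {len(set(p['pathway'] for p in receptor_profiles))} signaling pathways."
--     )
--
--     return " ".join(parts)
-- ===== SOURCE B (Python) =====
-- def generate_receptor_summary(receptor_profiles: list[dict]) -> str:
--     # Single reverse sweep that builds the comma-joined name strings directly
--     # (no intermediate lists, no parts list): prepending while walking backwards
--     # preserves the original name order.
--     if not receptor_profiles:
--         return "No peptide-relevant receptor variants detected in this patient."
--
--     hi_n = lo_n = 0
--     hi_s = lo_s = ""
--     pathways = set()
--     for p in reversed(receptor_profiles):
--         lvl = p["expression_level"]
--         if lvl == "HIGH":
--             hi_s = p["receptor_name"] + (", " + hi_s if hi_n else "")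
--             hi_n += 1
--         elif lvl == "LOW":
--             lo_s = p["receptor_name"] + (", " + lo_s if lo_n else "")
--             lo_n += 1
--         pathways.add(p["pathway"])
--
--     msg = ""
--     if hi_n:
--         msg += ("Patient shows elevated expression for " + hi_s +
--                 ", suggesting enhanced sensitivity to related peptide therapies. ")
--     if lo_n:
--         msg += ("Reduced expression predicted for " + lo_s +
--                 "; dose adjustment or alternative targets may be warranted. ")
--     if hi_n == 0 and lo_n == 0:
--         msg += ("All detected receptor expression levels are within normal range. "
--                 "Standard peptide dosing protocols are appropriate. ")
--
--     total = len(receptor_profiles)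
--     return msg + "Analysis covered %d receptor%s across %d signaling pathways." % (
--         total, "" if total == 1 else "s", len(pathways))
-- ===== Notes on version B (the rewrite author's own statement) =====
-- stated objective: alternative
-- what changed: B walks the list once in reverse, prepending names to build the comma-joined HIGH/LOW strings directly (no intermediate name lists and no parts list; the final narrative is assembled by plain concatenation), keeping only two counters and the pathway set.
import Mathlib
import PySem

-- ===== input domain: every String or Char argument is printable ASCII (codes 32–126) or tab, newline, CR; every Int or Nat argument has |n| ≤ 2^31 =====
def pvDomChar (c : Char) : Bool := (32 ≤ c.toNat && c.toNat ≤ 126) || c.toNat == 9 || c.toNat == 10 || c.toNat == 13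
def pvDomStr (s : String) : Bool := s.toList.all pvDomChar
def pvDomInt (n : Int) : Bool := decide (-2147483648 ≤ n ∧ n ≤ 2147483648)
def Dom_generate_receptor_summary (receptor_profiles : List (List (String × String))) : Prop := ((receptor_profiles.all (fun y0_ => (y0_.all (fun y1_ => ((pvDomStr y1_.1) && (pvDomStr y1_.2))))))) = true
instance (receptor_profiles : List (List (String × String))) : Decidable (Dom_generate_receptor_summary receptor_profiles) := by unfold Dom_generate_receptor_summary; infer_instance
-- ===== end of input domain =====

-- B replaces A's staged passes (two filtered comprehensions, a set comprehension, a parts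
-- list joined at the end) by ONE reverse sweep that builds the comma-joined name strings
-- directly by prepending and assembles the final narrative by plain concatenation
-- (objective: alternative; same O(n) cost).

-- shared helper: p[k] for a dict given as an association list (first match; "" never used under Pre_)
def pvKey (p : List (String × String)) (k : String) : String :=
  ((p.find? (fun kv => kv.1 == k)).map (fun kv => kv.2)).getD ""

def pvHasKey (p : List (String × String)) (k : String) : Bool :=
  (p.find? (fun kv => kv.1 == k)).isSome

-- ===== PORT A =====
def generate_receptor_summary (receptor_profiles : List (List (String × String))) : String :=
  if receptor_profiles = [] then
    "No peptide-relevant receptor variants detected in this patient."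
  else
    let high := receptor_profiles.filter (fun p => pvKey p "expression_level" == "HIGH")
    let low := receptor_profiles.filter (fun p => pvKey p "expression_level" == "LOW")
    let parts : List String := []
    let parts := if high ≠ [] then
        parts ++ ["Patient shows elevated expression for " ++
          PySem.Str.join ", " (high.map (fun p => pvKey p "receptor_name")) ++
          ", suggesting enhanced sensitivity to related peptide therapies."]
      else parts
    let parts := if low ≠ [] then
        parts ++ ["Reduced expression predicted for " ++
          PySem.Str.join ", " (low.map (fun p => pvKey p "receptor_name")) ++
          "; dose adjustment or alternative targets may be warranted."]
      else parts
    let parts := if high = [] ∧ low = [] then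
        parts ++ ["All detected receptor expression levels are within normal range. Standard peptide dosing protocols are appropriate."]
      else parts
    let total := receptor_profiles.length
    let parts := parts ++ ["Analysis covered " ++ PySem.Int.toStr (total : Int) ++
        " receptor" ++ (if total ≠ 1 then "s" else "") ++ " across " ++
        PySem.Int.toStr (PySem.Set.len (PySem.Set.ofList (receptor_profiles.map (fun p => pvKey p "pathway")))) ++
        " signaling pathways."]
    PySem.Str.join " " parts

-- ===== PORT B =====
-- loop body of Source B's single reverse sweep: state (hi_n, hi_s, lo_n, lo_s, pathways)
def pvStepB (st : Nat × String × Nat × String × PySem.Set String)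
    (p : List (String × String)) : Nat × String × Nat × String × PySem.Set String :=
  match st with
  | (hn, hs, ln, ls, pw) =>
    let lvl := pvKey p "expression_level"
    if lvl == "HIGH" then
      (hn + 1, pvKey p "receptor_name" ++ (if hn = 0 then "" else ", " ++ hs), ln, ls,
        PySem.Set.add pw (pvKey p "pathway"))
    else if lvl == "LOW" then
      (hn, hs, ln + 1, pvKey p "receptor_name" ++ (if ln = 0 then "" else ", " ++ ls),
        PySem.Set.add pw (pvKey p "pathway"))
    else
      (hn, hs, ln, ls, PySem.Set.add pw (pvKey p "pathway"))

def generate_receptor_summary_alt (receptor_profiles : List (List (String × String))) : String :=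
  if receptor_profiles = [] then
    "No peptide-relevant receptor variants detected in this patient."
  else
    match receptor_profiles.reverse.foldl pvStepB (0, "", 0, "", PySem.Set.empty) with
    | (hn, hs, ln, ls, pw) =>
      let msg := ""
      let msg := if hn ≠ 0 then
          msg ++ ("Patient shows elevated expression for " ++ hs ++
            ", suggesting enhanced sensitivity to related peptide therapies. ")
        else msg
      let msg := if ln ≠ 0 then
          msg ++ ("Reduced expression predicted for " ++ ls ++
            "; dose adjustment or alternative targets may be warranted. ")
        else msg
      let msg := if hn = 0 ∧ ln = 0 then
          msg ++ "All detected receptor expression levels are within normal range. Standard peptide dosing protocols are appropriate. "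
        else msg
      let total := receptor_profiles.length
      msg ++ ("Analysis covered " ++ PySem.Int.toStr (total : Int) ++ " receptor" ++
        (if total = 1 then "" else "s") ++ " across " ++
        PySem.Int.toStr (PySem.Set.len pw) ++ " signaling pathways.")

-- ===== PRECONDITION & SPEC =====
-- Pre_ excludes exactly the inputs on which the Python A raises KeyError: a profile missing
-- "expression_level" or "pathway", or a HIGH/LOW profile missing "receptor_name".
def Pre_generate_receptor_summary (receptor_profiles : List (List (String × String))) : Prop :=
  ∀ p ∈ receptor_profiles, pvHasKey p "expression_level" = true ∧ pvHasKey p "pathway" = true ∧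
    ((pvKey p "expression_level" = "HIGH" ∨ pvKey p "expression_level" = "LOW") →
      pvHasKey p "receptor_name" = true)
instance (receptor_profiles : List (List (String × String))) : Decidable (Pre_generate_receptor_summary receptor_profiles) := by unfold Pre_generate_receptor_summary; infer_instance

def pvWitness_generate_receptor_summary : (List (List (String × String))) :=
  [[("expression_level", "HIGH"), ("receptor_name", "GLP1R"), ("pathway", "incretin")],
   [("expression_level", "NORMAL"), ("pathway", "opioid")]]

def Spec_generate_receptor_summary (receptor_profiles : List (List (String × String))) (out : String) : Prop := out = generate_receptor_summary_alt receptor_profiles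
instance (receptor_profiles : List (List (String × String))) (out : String) : Decidable (Spec_generate_receptor_summary receptor_profiles out) := by unfold Spec_generate_receptor_summary; infer_instance

-- ===== CLAIM (what is proved, stated in full; the proofs are below) =====
def Claim_equal_generate_receptor_summary : Prop := ∀ (receptor_profiles : List (List (String × String))), Dom_generate_receptor_summary receptor_profiles → Pre_generate_receptor_summary receptor_profiles → Spec_generate_receptor_summary receptor_profiles (generate_receptor_summary receptor_profiles)

-- ===== LEMMAS AND PROOFS =====

-- Str.join on explicit lists (proved through Chars.join)
lemma pvJoin_singleton (sep a : String) : PySem.Str.join sep [a] = a := by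
  apply String.toList_inj.mp
  simp [PySem.Str.toList_join, PySem.Chars.join_singleton]

lemma pvJoin_cons_cons (sep a b : String) (t : List String) :
    PySem.Str.join sep (a :: b :: t) = a ++ sep ++ PySem.Str.join sep (b :: t) := by
  apply String.toList_inj.mp
  simp [PySem.Str.toList_join, PySem.Chars.join_cons_cons]

lemma pvJoin_cons (sep a : String) (t : List String) :
    PySem.Str.join sep (a :: t) =
      a ++ (if t = [] then "" else sep ++ PySem.Str.join sep t) := by
  cases t with
  | nil => simp [pvJoin_singleton]
  | cons b r => simp [pvJoin_cons_cons, String.append_assoc]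

-- the pathway accumulation of B's sweep, as a foldr
def pvPathFold (rp : List (List (String × String))) (s : PySem.Set String) : PySem.Set String :=
  rp.foldr (fun p t => PySem.Set.add t (pvKey p "pathway")) s

lemma pvMem_pathFold (rp : List (List (String × String))) (x : String) :
    x ∈ pvPathFold rp PySem.Set.empty ↔ x ∈ rp.map (fun p => pvKey p "pathway") := by
  induction rp with
  | nil => simp [pvPathFold, PySem.Set.empty]
  | cons p rest ih =>
    simp [pvPathFold, PySem.Set.mem_add] at ih ⊢
    rw [ih]; exact or_comm

lemma pvNodup_pathFold (rp : List (List (String × String))) :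
    (pvPathFold rp PySem.Set.empty).Nodup := by
  induction rp with
  | nil => simp [pvPathFold, PySem.Set.empty]
  | cons p rest ih => exact PySem.Set.nodup_add _ _ ih

-- B's set has the same length as A's set(p['pathway'] for p in …)
lemma pvLen_pathFold (rp : List (List (String × String))) :
    PySem.Set.len (pvPathFold rp PySem.Set.empty) =
      PySem.Set.len (PySem.Set.ofList (rp.map (fun p => pvKey p "pathway"))) := by
  have hperm : (pvPathFold rp PySem.Set.empty).Perm
      (PySem.Set.ofList (rp.map (fun p => pvKey p "pathway"))) := by
    rw [List.perm_ext_iff_of_nodup (pvNodup_pathFold rp) (PySem.Set.nodup_ofList _)]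
    intro a
    rw [pvMem_pathFold, PySem.Set.mem_ofList]
  simp only [PySem.Set.len]
  exact_mod_cast hperm.length_eq

-- B's single sweep computes A's filtered name lists, joined, plus the pathway fold
lemma pvStepB_foldr (rp : List (List (String × String))) (s : PySem.Set String) :
    rp.foldr (fun p st => pvStepB st p) (0, "", 0, "", s) =
      (((rp.filter (fun p => pvKey p "expression_level" == "HIGH")).map (fun p => pvKey p "receptor_name")).length,
       PySem.Str.join ", " ((rp.filter (fun p => pvKey p "expression_level" == "HIGH")).map (fun p => pvKey p "receptor_name")),
       ((rp.filter (fun p => pvKey p "expression_level" == "LOW")).map (fun p => pvKey p "receptor_name")).length,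
       PySem.Str.join ", " ((rp.filter (fun p => pvKey p "expression_level" == "LOW")).map (fun p => pvKey p "receptor_name")),
       pvPathFold rp s) := by
  induction rp with
  | nil => simp [pvPathFold, PySem.Str.join]
  | cons p rest ih =>
    simp only [List.foldr_cons, ih, List.filter_cons]
    by_cases hH : pvKey p "expression_level" = "HIGH"
    · simp [pvStepB, hH, pvPathFold, pvJoin_cons, List.length_eq_zero_iff]
    · by_cases hL : pvKey p "expression_level" = "LOW"
      · simp [pvStepB, hL, pvPathFold, pvJoin_cons, List.length_eq_zero_iff]
      · simp [pvStepB, hH, hL, pvPathFold]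

-- ===== VERDICT =====
theorem generate_receptor_summary_spec : Claim_equal_generate_receptor_summary := by
  intro rp _ _
  unfold Spec_generate_receptor_summary generate_receptor_summary generate_receptor_summary_alt
  by_cases hnil : rp = []
  · simp [hnil]
  · simp only [hnil, if_false, List.foldl_reverse]
    rw [pvStepB_foldr rp PySem.Set.empty]
    rw [pvLen_pathFold rp]
    by_cases h1 : rp.filter (fun p => pvKey p "expression_level" == "HIGH") = [] <;>
      by_cases h2 : rp.filter (fun p => pvKey p "expression_level" == "LOW") = [] <;>
        by_cases h3 : rp.length = 1 <;>
          · simp only [h1, h2, h3, List.map_nil, List.length_nil]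
            apply String.toList_inj.mp
            simp [h1, h2, h3, PySem.Str.toList_join, PySem.Chars.join_singleton,
              PySem.Chars.join_cons_cons, List.length_eq_zero_iff]
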